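-- pv_equiv track=rewrite | github.com/alisa-k/aoc | 2022/day08/solve.py | view_distance
-- ===== SOURCE A (Python) =====
-- def view_distance(arr):
-- 	distances = [0]
-- 	stack = [0]
-- 	for i in range(1, len(arr)):
-- 		# maintain stack of decreasing order
-- 		while stack and arr[stack[-1]] < arr[i]:
-- 			stack.pop()
-- 		# view distance is i if this is the largest element seen so far
-- 		# otherwise, view distance is distance between last largest seen
-- 		view_distance = i if not stack else i - stack[-1]
-- 		distances.append(view_distance)
-- 		stack.append(i)
-- 	return distances
-- ===== SOURCE B (Python) =====
-- def view_distance(arr):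
--     distances = [0]
--     for i in range(1, len(arr)):
--         count = 0
--         for j in range(i - 1, -1, -1):
--             count += 1
--             if arr[j] >= arr[i]:
--                 break
--         distances.append(count)
--     return distances
-- ===== Notes on version B (the rewrite author's own statement) =====
-- stated objective: alternative
-- what changed: Replaces the single-pass monotonic-stack computation with a direct brute-force scan: for each index walk leftwards counting steps until a tree of equal or greater height blocks the view.
import Mathlib
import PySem

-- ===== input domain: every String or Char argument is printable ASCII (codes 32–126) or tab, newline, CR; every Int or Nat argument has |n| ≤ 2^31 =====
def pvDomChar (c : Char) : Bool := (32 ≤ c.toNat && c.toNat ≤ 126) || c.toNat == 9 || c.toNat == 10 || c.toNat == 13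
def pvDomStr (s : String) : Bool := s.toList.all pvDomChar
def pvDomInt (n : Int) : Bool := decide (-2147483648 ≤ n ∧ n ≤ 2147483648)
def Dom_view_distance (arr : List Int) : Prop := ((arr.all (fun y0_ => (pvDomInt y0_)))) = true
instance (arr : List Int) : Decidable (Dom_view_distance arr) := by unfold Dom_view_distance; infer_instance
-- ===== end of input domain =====

-- B replaces A's monotonic stack by a brute-force leftward scan per index (same values, O(n^2) instead of O(n)).

-- ===== PORT A =====
-- the `while stack and arr[stack[-1]] < arr[i]: stack.pop()` loop; the stack is kept
-- top-first (Python's stack[-1] is the head here).  All indices stored in the stack are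
-- valid positions of arr, so `getD` is exact for Python's arr[...].
def vd_pop (arr : List Int) (hi : Int) : List Nat → List Nat
  | [] => []
  | t :: rest => if arr.getD t 0 < hi then vd_pop arr hi rest else t :: rest

-- one iteration of A's `for i in range(1, len(arr))` body over the state (distances, stack)
def vd_step (arr : List Int) (s : List Int × List Nat) (i : Nat) : List Int × List Nat :=
  let st := vd_pop arr (arr.getD i 0) s.2
  let d : Int := if st = [] then (i : Int) else (i : Int) - (st.head! : Int)
  (s.1 ++ [d], i :: st)

-- `range(1, len(arr))` is List.range' 1 (len-1) (empty when len ≤ 1, as in Python)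
def view_distance (arr : List Int) : List Int :=
  ((List.range' 1 (arr.length - 1)).foldl (vd_step arr) ([0], [0])).1

-- ===== PORT B =====
-- inner loop of B: starting at position j and walking down to 0, count the steps taken,
-- stopping as soon as arr[j] >= hi.  All visited indices are valid, so getD is exact.
def vd_go (arr : List Int) (hi : Int) : Nat → Int
  | 0 => 1
  | j + 1 => if arr.getD (j + 1) 0 ≥ hi then 1 else 1 + vd_go arr hi j

def view_distance_alt (arr : List Int) : List Int :=
  [0] ++ (List.range' 1 (arr.length - 1)).map (fun i => vd_go arr (arr.getD i 0) (i - 1))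

-- ===== PRECONDITION & SPEC =====
def Spec_view_distance (arr : List Int) (out : List Int) : Prop := out = view_distance_alt arr
instance (arr : List Int) (out : List Int) : Decidable (Spec_view_distance arr out) := by unfold Spec_view_distance; infer_instance

-- ===== CLAIM (what is proved, stated in full; the proofs are below) =====
def Claim_equal_view_distance : Prop := ∀ (arr : List Int), Dom_view_distance arr → Spec_view_distance arr (view_distance arr)

-- ===== LEMMAS AND PROOFS =====

-- nb arr hi j = the greatest index k <= j with arr[k] >= hi (searching downward), if any
def nb (arr : List Int) (hi : Int) : Nat → Option Nat
  | 0 => if arr.getD 0 0 ≥ hi then some 0 else none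
  | j + 1 => if arr.getD (j + 1) 0 ≥ hi then some (j + 1) else nb arr hi j

theorem nb_le (arr : List Int) (hi : Int) : ∀ j k, nb arr hi j = some k → k ≤ j := by
  intro j
  induction j with
  | zero => intro k h; simp only [nb] at h; split_ifs at h <;> simp_all
  | succ j ih =>
    intro k h
    simp only [nb] at h
    split_ifs at h with hc
    · injection h with h; omega
    · exact Nat.le_succ_of_le (ih k h)

theorem nb_between (arr : List Int) (hi : Int) :
    ∀ j k, nb arr hi j = some k → ∀ m, k < m → m ≤ j → arr.getD m 0 < hi := by
  intro j
  induction j with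
  | zero => intro k h m h1 h2; simp only [nb] at h; split_ifs at h <;> simp_all <;> omega
  | succ j ih =>
    intro k h m h1 h2
    simp only [nb] at h
    split_ifs at h with hc
    · injection h with h; omega
    · rcases Nat.lt_or_ge m (j + 1) with hm | hm
      · exact ih k h m h1 (by omega)
      · have hmeq : m = j + 1 := by omega
        subst hmeq; omega

theorem nb_none (arr : List Int) (hi : Int) :
    ∀ j, nb arr hi j = none → ∀ m, m ≤ j → arr.getD m 0 < hi := by
  intro j
  induction j with
  | zero =>
    intro h m hm
    simp only [nb] at h
    split_ifs at h with hc
    have hm0 : m = 0 := by omega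
    subst hm0; omega
  | succ j ih =>
    intro h m hm
    simp only [nb] at h
    split_ifs at h with hc
    rcases Nat.lt_or_ge m (j + 1) with hm' | hm'
    · exact ih h m (by omega)
    · have hmeq : m = j + 1 := by omega
      subst hmeq; omega

theorem nb_none_of (arr : List Int) (hi : Int) :
    ∀ j, (∀ m, m ≤ j → arr.getD m 0 < hi) → nb arr hi j = none := by
  intro j
  induction j with
  | zero =>
    intro h
    simp only [nb]
    rw [if_neg (not_le.mpr (h 0 le_rfl))]
  | succ j ih =>
    intro h
    simp only [nb]
    rw [if_neg (not_le.mpr (h (j + 1) le_rfl))]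
    exact ih (fun m hm => h m (by omega))

theorem nb_skip (arr : List Int) (hi : Int) :
    ∀ j k, k ≤ j → (∀ m, k < m → m ≤ j → arr.getD m 0 < hi) →
    nb arr hi j = nb arr hi k := by
  intro j
  induction j with
  | zero => intro k hk _; rw [Nat.le_zero.mp hk]
  | succ j ih =>
    intro k hk hall
    rcases Nat.lt_or_ge k (j + 1) with hk' | hk'
    · have hj1 := hall (j + 1) (by omega) le_rfl
      simp only [nb]
      rw [if_neg (not_le.mpr hj1)]
      exact ih k (by omega) (fun m h1 h2 => hall m h1 (by omega))
    · have : k = j + 1 := by omega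
      subst this; rfl

-- the chain: the stack A holds after processing index i (top first):
-- i, then the nearest previous index with height >= arr[i], and so on
def chain (arr : List Int) (i : Nat) : List Nat :=
  if h0 : i = 0 then [0]
  else
    i :: (match h : nb arr (arr.getD i 0) (i - 1) with
          | none => []
          | some j => chain arr j)
termination_by i
decreasing_by
  have := nb_le arr (arr.getD i 0) (i - 1) j h
  omega

def chainOpt (arr : List Int) : Option Nat → List Nat
  | none => []
  | some j => chain arr j

theorem chain_eq (arr : List Int) (i : Nat) :
    chain arr i =
      i :: chainOpt arr (if i = 0 then none else nb arr (arr.getD i 0) (i - 1)) := by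
  rw [chain]
  split_ifs with h0
  · subst h0; rfl
  · congr 1
    split <;> simp_all [chainOpt]

theorem chain_ne_nil (arr : List Int) (i : Nat) : chain arr i ≠ [] := by
  rw [chain_eq]; simp

theorem chain_head (arr : List Int) (i : Nat) : (chain arr i).head! = i := by
  rw [chain_eq]; rfl

-- popping A's stack for a new height hi takes the chain of i to the chain of the
-- nearest index <= i whose height is >= hi
theorem pop_chain (arr : List Int) (hi : Int) :
    ∀ i, vd_pop arr hi (chain arr i) = chainOpt arr (nb arr hi i) := by
  intro i
  induction i using Nat.strong_induction_on with
  | _ i ih =>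
    rw [chain_eq]
    by_cases h0 : i = 0
    · subst h0
      simp only [if_pos rfl, chainOpt, vd_pop, nb]
      split_ifs with hc hc2 hc2
      · exact absurd hc2 (not_le.mpr hc)
      · rfl
      · simp [chainOpt, chain_eq]
      · exfalso; omega
    · obtain ⟨j', rfl⟩ : ∃ j', i = j' + 1 := ⟨i - 1, by omega⟩
      rw [if_neg h0]
      simp only [vd_pop, Nat.add_sub_cancel]
      split_ifs with hc
      · -- arr[j'+1] < hi : the top is popped, continue below
        have hnb : nb arr hi (j' + 1) = nb arr hi j' := by
          simp only [nb]; rw [if_neg (not_le.mpr hc)]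
        rw [hnb]
        rcases h : nb arr (arr.getD (j' + 1) 0) j' with _ | k
        · simp only [chainOpt, vd_pop]
          rw [nb_none_of arr hi j' (fun m hm => lt_trans (nb_none arr _ j' h m hm) hc)]
        · simp only [chainOpt]
          rw [ih k (by have := nb_le arr _ j' k h; omega)]
          congr 1
          exact (nb_skip arr hi j' k (nb_le arr _ j' k h)
            (fun m h1 h2 => lt_trans (nb_between arr _ j' k h m h1 h2) hc)).symm
      · -- arr[j'+1] >= hi : the stack is unchanged and nb finds j'+1 itself
        have hnb : nb arr hi (j' + 1) = some (j' + 1) := by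
          simp only [nb]; rw [if_pos (not_lt.mp hc)]
        rw [hnb]
        simp only [chainOpt]
        rw [chain_eq, if_neg h0]
        rfl

-- B's counting scan computes j+1 minus the found index (or j+1 when none is found)
theorem vd_go_nb (arr : List Int) (hi : Int) :
    ∀ j, vd_go arr hi j =
      (j + 1 : Int) - (match nb arr hi j with | some k => (k : Int) | none => 0) := by
  intro j
  induction j with
  | zero =>
    simp only [vd_go, nb]
    split_ifs <;> simp
  | succ j ih =>
    simp only [vd_go, nb]
    split_ifs with hc
    · push_cast; ring
    · rw [ih]
      rcases nb arr hi j with _ | k <;> push_cast <;> ring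

-- one step of A's fold on a chain-shaped state appends exactly B's value
theorem step_chain (arr : List Int) (m : Nat) (D : List Int) :
    vd_step arr (D, chain arr m) (m + 1) =
      (D ++ [vd_go arr (arr.getD (m + 1) 0) m], chain arr (m + 1)) := by
  unfold vd_step
  simp only
  rw [pop_chain, vd_go_nb]
  have hif : (if m + 1 = 0 then (none : Option Nat)
      else nb arr (arr.getD (m + 1) 0) (m + 1 - 1)) = nb arr (arr.getD (m + 1) 0) m := by
    simp
  conv_rhs => rw [chain_eq, hif]
  rcases h : nb arr (arr.getD (m + 1) 0) m with _ | k
  · simp only [chainOpt, Prod.mk.injEq]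
    refine ⟨?_, trivial⟩
    congr 1
  · simp only [chainOpt, Prod.mk.injEq]
    refine ⟨?_, trivial⟩
    rw [if_neg (chain_ne_nil arr k), chain_head]
    congr 1

-- main invariant of A's fold: distances so far = B's values, stack = chain of the last index
theorem fold_inv (arr : List Int) :
    ∀ m, (List.range' 1 m).foldl (vd_step arr) ([0], [0]) =
      ([0] ++ (List.range' 1 m).map (fun i => vd_go arr (arr.getD i 0) (i - 1)),
       chain arr m) := by
  intro m
  induction m with
  | zero => simp [chain]
  | succ m ih =>
    rw [List.range'_1_concat, List.foldl_append, ih]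
    simp only [List.foldl_cons, List.foldl_nil, List.map_append, List.map_cons, List.map_nil]
    have h1m : 1 + m = m + 1 := Nat.add_comm 1 m
    rw [h1m, step_chain]
    simp

-- ===== VERDICT (by name: the statement is the Claim_ definition above) =====
theorem view_distance_spec : Claim_equal_view_distance := by
  intro arr _
  unfold Spec_view_distance view_distance view_distance_alt
  rw [fold_inv]
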